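-- pv_equiv track=rewrite | github.com/joseph-lindgren/PythonMySQL-Demo | EveMarketLib.py | gethtmlchunkImproved
-- ===== SOURCE A (Python) =====
-- def gethtmlchunkImproved( html, flaglist ):
-- 	flag = flaglist[0]
-- 	if flag == 'buy' or flag == 'sell' or flag == 'volume' or flag == 'avg' or flag == 'max' or flag == 'min':
-- 		flag = flag + ">"
--
-- 	html = html.split("<" + flag )
-- 	if len(html) > 1:
-- 		html = html[1]
-- 		html = html.split("</"+flag )
--
-- 	if len(flaglist) > 1:
-- 		return gethtmlchunkImproved( html[0], flaglist[1:] )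
-- 	else:
-- 		return html[0]
--
-- 	return None
-- ===== SOURCE B (Python) =====
-- def gethtmlchunkImproved(html, flaglist):
--     cur = html
--     for flag in flaglist:
--         if flag in ('buy', 'sell', 'volume', 'avg', 'max', 'min'):
--             flag = flag + '>'
--         parts = cur.split('<' + flag)
--         if len(parts) > 1:
--             parts = parts[1].split('</' + flag)
--         cur = parts[0]
--     return cur
-- ===== Notes on version B (the rewrite author's own statement) =====
-- stated objective: simpler
-- what changed: Replaces the tail recursion on flaglist (with slicing flaglist[1:]) by a single iterative loop folding a working string over the flags.
import Mathlib
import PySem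

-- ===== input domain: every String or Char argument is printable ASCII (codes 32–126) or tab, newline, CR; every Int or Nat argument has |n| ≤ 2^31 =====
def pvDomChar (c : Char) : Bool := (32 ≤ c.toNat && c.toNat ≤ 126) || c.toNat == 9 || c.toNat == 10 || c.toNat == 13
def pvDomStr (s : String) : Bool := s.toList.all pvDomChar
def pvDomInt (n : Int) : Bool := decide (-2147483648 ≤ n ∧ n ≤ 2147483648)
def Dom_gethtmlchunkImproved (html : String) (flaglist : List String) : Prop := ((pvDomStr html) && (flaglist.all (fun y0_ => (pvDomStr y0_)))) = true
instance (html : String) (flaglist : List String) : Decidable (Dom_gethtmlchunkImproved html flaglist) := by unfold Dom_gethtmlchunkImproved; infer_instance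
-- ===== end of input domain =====

-- ===== PORT A =====
-- B replaces A's tail recursion over flaglist by an iterative fold of a working string; return value only.
def gethtmlchunkImproved (html : String) (flaglist : List String) : String :=
  match flaglist with
  | [] => ""  -- Python raises IndexError here (flaglist[0]); excluded by Pre_
  | flag0 :: rest =>
    let flag := if flag0 = "buy" ∨ flag0 = "sell" ∨ flag0 = "volume" ∨ flag0 = "avg" ∨ flag0 = "max" ∨ flag0 = "min" then flag0 ++ ">" else flag0
    let parts := (PySem.Str.split? html ("<" ++ flag)).getD []  -- sep "<"++flag ≠ "": split? is always some
    let parts := if parts.length > 1 then (PySem.Str.split? (parts.getD 1 "") ("</" ++ flag)).getD [] else parts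
    if rest.length > 0 then gethtmlchunkImproved (parts.getD 0 "") rest
    else parts.getD 0 ""

-- ===== PORT B =====
-- loop body of B: one flag applied to the working string
def pvStep (cur : String) (flag : String) : String :=
  let flag := if flag ∈ ["buy", "sell", "volume", "avg", "max", "min"] then flag ++ ">" else flag
  let parts := (PySem.Str.split? cur ("<" ++ flag)).getD []  -- sep nonempty: split? is always some
  let parts := if parts.length > 1 then (PySem.Str.split? (parts.getD 1 "") ("</" ++ flag)).getD [] else parts
  parts.getD 0 ""

def gethtmlchunkImproved_alt (html : String) (flaglist : List String) : String :=
  flaglist.foldl pvStep html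

-- ===== PRECONDITION & SPEC =====
-- Pre_ excludes the empty flaglist, on which Python A raises IndexError.
def Pre_gethtmlchunkImproved (_html : String) (flaglist : List String) : Prop := flaglist ≠ []
instance (html : String) (flaglist : List String) : Decidable (Pre_gethtmlchunkImproved html flaglist) := by unfold Pre_gethtmlchunkImproved; infer_instance
def pvWitness_gethtmlchunkImproved : String × List String := ("<a>x</a>", ["a"])

def Spec_gethtmlchunkImproved (html : String) (flaglist : List String) (out : String) : Prop := out = gethtmlchunkImproved_alt html flaglist
instance (html : String) (flaglist : List String) (out : String) : Decidable (Spec_gethtmlchunkImproved html flaglist out) := by unfold Spec_gethtmlchunkImproved; infer_instance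

-- ===== CLAIM (what is proved, stated in full; the proofs are below) =====
def Claim_equal_gethtmlchunkImproved : Prop := ∀ (html : String) (flaglist : List String), Dom_gethtmlchunkImproved html flaglist → Pre_gethtmlchunkImproved html flaglist → Spec_gethtmlchunkImproved html flaglist (gethtmlchunkImproved html flaglist)

-- ===== LEMMAS AND PROOFS =====
theorem pvStep_eq (html flag0 : String) :
    pvStep html flag0 =
      (let flag := if flag0 = "buy" ∨ flag0 = "sell" ∨ flag0 = "volume" ∨ flag0 = "avg" ∨ flag0 = "max" ∨ flag0 = "min" then flag0 ++ ">" else flag0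
       let parts := (PySem.Str.split? html ("<" ++ flag)).getD []  -- sep "<"++flag ≠ "": split? is always some
       let parts := if parts.length > 1 then (PySem.Str.split? (parts.getD 1 "") ("</" ++ flag)).getD [] else parts
       parts.getD 0 "") := by
  simp only [pvStep, List.mem_cons, List.not_mem_nil, or_false]

theorem gethtml_key (fl : List String) : ∀ (html : String), fl ≠ [] →
    gethtmlchunkImproved html fl = List.foldl pvStep html fl := by
  induction fl with
  | nil => intro html h; exact absurd rfl h
  | cons f rest ih =>
    intro html _
    rw [List.foldl_cons]
    rw [gethtmlchunkImproved, pvStep_eq]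
    cases rest with
    | nil => simp
    | cons g tl =>
      simp only [List.length_cons, if_pos, gt_iff_lt, Nat.zero_lt_succ]
      exact ih _ (by simp)

-- ===== VERDICT (by name: the statement is the Claim_ definition above) =====
theorem gethtmlchunkImproved_spec : Claim_equal_gethtmlchunkImproved := by
  intro html fl _ hpre
  unfold Spec_gethtmlchunkImproved gethtmlchunkImproved_alt
  exact gethtml_key fl html hpre
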